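-- pv_equiv track=rewrite | github.com/viljo/Low-latency_stream_kit | tspi_kit/jetstream_client.py | normalize_stream_subjects
-- ===== SOURCE A (Python) =====
-- from typing import Iterable, List, Optional, Sequence
--
-- def normalize_stream_subjects(subjects: Sequence[str]) -> List[str]:
--     """Remove redundant subjects that are already covered by broader wildcards."""
--
--     entries: List[tuple[str, tuple[str, ...], tuple[str, ...] | None]] = []
--     for subject in subjects:
--         tokens = tuple(subject.split("."))
--         tail_prefix: tuple[str, ...] | None = None
--         if tokens and tokens[-1] == ">":
--             tail_prefix = tokens[:-1]
--         entries.append((subject, tokens, tail_prefix))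
--
--     normalized: List[str] = []
--     for index, (subject, tokens, _tail_prefix) in enumerate(entries):
--         covered = False
--         for other_index, (_, _, other_tail_prefix) in enumerate(entries):
--             if index == other_index:
--                 continue
--             if other_tail_prefix is None:
--                 continue
--             if len(tokens) < len(other_tail_prefix):
--                 continue
--             if tokens[: len(other_tail_prefix)] == other_tail_prefix:
--                 covered = True
--                 break
--         if not covered:
--             normalized.append(subject)
--     return normalized
-- ===== SOURCE B (Python) =====
-- def _tail_key(tokens):
--     """Key under which a '>'-terminated subject covers others: its leading tokens."""
--     if tokens[-1] == ">":
--         return tuple(tokens[:-1])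
--     return None
--
--
-- def _covered(counts, own, acc, rest):
--     """Does any wildcard (counted in counts, excluding self via own) cover acc+rest?"""
--     c = counts.get(acc, 0)
--     if acc == own:
--         c -= 1
--     if c > 0:
--         return True
--     if not rest:
--         return False
--     return _covered(counts, own, acc + (rest[0],), rest[1:])
--
--
-- def normalize_stream_subjects(subjects):
--     """Remove redundant subjects that are already covered by broader wildcards."""
--     token_lists = [subject.split(".") for subject in subjects]
--     counts = {}
--     for tokens in token_lists:
--         key = _tail_key(tokens)
--         if key is not None:
--             counts[key] = counts.get(key, 0) + 1
--     result = []
--     for subject, tokens in zip(subjects, token_lists):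
--         if not _covered(counts, _tail_key(tokens), (), tuple(tokens)):
--             result.append(subject)
--     return result
-- ===== Notes on version B (the rewrite author's own statement) =====
-- stated objective: faster
-- what changed: Replaces the quadratic all-pairs scan with a hash counter of wildcard tail-prefixes built in one pass; each subject then tests its own prefixes by dictionary lookup, excluding itself via the count.
import Mathlib
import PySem

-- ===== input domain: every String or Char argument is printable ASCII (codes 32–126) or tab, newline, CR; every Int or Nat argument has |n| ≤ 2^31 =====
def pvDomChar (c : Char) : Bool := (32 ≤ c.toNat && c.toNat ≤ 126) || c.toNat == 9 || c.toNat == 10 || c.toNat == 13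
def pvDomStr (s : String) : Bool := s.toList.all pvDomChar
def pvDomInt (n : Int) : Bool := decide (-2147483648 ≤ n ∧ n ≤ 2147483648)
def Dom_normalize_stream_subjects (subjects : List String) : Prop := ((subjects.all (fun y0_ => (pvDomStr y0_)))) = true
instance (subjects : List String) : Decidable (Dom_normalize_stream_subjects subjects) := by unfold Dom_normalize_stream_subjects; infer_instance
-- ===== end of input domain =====

-- B replaces A's quadratic all-pairs scan by a one-pass hash counter of wildcard tail-prefixes
-- plus a per-subject prefix lookup (self excluded via the count); objective: faster.

-- ===== PORT A =====
-- subject.split("."): the separator is the literal "." ≠ "", so split? is always `some`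
-- and the .getD [] default is unreachable. (Used by both ports: both Pythons call split(".").)
def splitDot (s : String) : List String := (PySem.Str.split? s ".").getD []

-- A: tail_prefix = tokens[:-1] if tokens and tokens[-1] == ">" else None
def pyTailA (tokens : List String) : Option (List String) :=
  if tokens ≠ [] && (PySem.List.pyGet? tokens (-1) == some ">") then
    some (PySem.List.slice tokens none (some (-1)))
  else none

-- A's inner 'for other_index, … in enumerate(entries)' loop with its continue/break structure.
def innerA (i : Int) (tokens : List String) :
    List (Int × String × List String × Option (List String)) → Bool
  | [] => false
  | (j, _, _, otp) :: rest =>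
    if i == j then innerA i tokens rest
    else
      match otp with
      | none => innerA i tokens rest
      | some p =>
        if tokens.length < p.length then innerA i tokens rest
        else if PySem.List.slice tokens none (some (p.length : Int)) == p then true
        else innerA i tokens rest

def normalize_stream_subjects (subjects : List String) : List String :=
  let entries := subjects.map (fun subject =>
    let tokens := splitDot subject
    (subject, tokens, pyTailA tokens))
  let enum := PySem.List.enumerate entries
  enum.foldl (fun acc e =>
    if innerA e.1 e.2.2.1 enum then acc else acc ++ [e.2.1]) []

-- ===== PORT B =====
-- B: _tail_key(tokens); tokens is never empty in the program (split always yields ≥ 1 token),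
-- so the `none` branch for [] (where Python would raise IndexError) is unreachable.
def tailKeyB (tokens : List String) : Option (List String) :=
  match tokens.getLast? with
  | some last => if last == ">" then some (PySem.List.slice tokens none (some (-1))) else none
  | none => none

-- B: _covered(counts, own, acc, rest), structural recursion on rest.
def coveredB (counts : PySem.Dict (List String) Int) (own : Option (List String))
    (acc rest : List String) : Bool :=
  let c0 := counts.getD acc 0
  let c := if some acc == own then c0 - 1 else c0
  if c > 0 then true
  else
    match rest with
    | [] => false
    | x :: xs => coveredB counts own (acc ++ [x]) xs

def normalize_stream_subjects_alt (subjects : List String) : List String :=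
  let tokenLists := subjects.map (fun subject => splitDot subject)
  let counts := tokenLists.foldl (fun d tokens =>
    match tailKeyB tokens with
    | some key => d.insert key (d.getD key 0 + 1)
    | none => d) PySem.Dict.empty
  (subjects.zip tokenLists).foldl (fun res pr =>
    if coveredB counts (tailKeyB pr.2) [] pr.2 then res else res ++ [pr.1]) []

-- ===== PRECONDITION & SPEC =====
def Spec_normalize_stream_subjects (subjects : List String) (out : List String) : Prop := out = normalize_stream_subjects_alt subjects
instance (subjects : List String) (out : List String) : Decidable (Spec_normalize_stream_subjects subjects out) := by unfold Spec_normalize_stream_subjects; infer_instance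

-- ===== CLAIM (what is proved, stated in full; the proofs are below) =====
def Claim_equal_normalize_stream_subjects : Prop := ∀ (subjects : List String), Dom_normalize_stream_subjects subjects → Spec_normalize_stream_subjects subjects (normalize_stream_subjects subjects)

-- ===== LEMMAS AND PROOFS =====

-- The two tail-prefix helpers compute the same option.
theorem pyGet_neg_one (t : List String) (hne : t ≠ []) :
    PySem.List.pyGet? t (-1) = some (t.getLast hne) := by
  have hlen : 1 ≤ t.length := List.length_pos_iff.mpr hne
  simp [PySem.List.pyGet?, PySem.List.pyIdx?, hlen]
  rw [List.getElem?_eq_getElem (by omega)]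
  simp [List.getLast_eq_getElem]

theorem pyTailA_eq_tailKeyB (t : List String) : pyTailA t = tailKeyB t := by
  unfold pyTailA tailKeyB
  rcases eq_or_ne t [] with rfl | hne
  · simp
  · have hlast : t.getLast? = some (t.getLast hne) := List.getLast?_eq_some_getLast hne
    rw [hlast, pyGet_neg_one t hne]
    simp [hne]

-- B's counter loop (skipping non-wildcards) is the insert-counter fold over the wildcard keys.
theorem counts_eq_counter (ts : List (List String)) (d : PySem.Dict (List String) Int) :
    ts.foldl (fun d tokens =>
      match tailKeyB tokens with
      | some key => d.insert key (d.getD key 0 + 1)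
      | none => d) d
    = (ts.filterMap tailKeyB).foldl (fun d key => d.insert key (d.getD key 0 + 1)) d := by
  induction ts generalizing d with
  | nil => rfl
  | cons x xs ih =>
    simp only [List.foldl_cons, List.filterMap_cons]
    cases h : tailKeyB x with
    | none => simpa [h] using ih d
    | some k => simp [ih]

-- The value B's counter holds at p: how many token lists have tail key p.
theorem counts_getD (ts : List (List String)) (p : List String) :
    (ts.foldl (fun d tokens =>
      match tailKeyB tokens with
      | some key => d.insert key (d.getD key 0 + 1)
      | none => d) (PySem.Dict.empty : PySem.Dict (List String) Int)).getD p 0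
    = ((ts.countP fun u => tailKeyB u == some p : Nat) : Int) := by
  rw [counts_eq_counter, PySem.Dict.foldl_insert_getD_add_one_eq_counter,
    PySem.Dict.getD_counter, List.count_filterMap]

-- Characterisation of B's recursive prefix scan.
theorem coveredB_iff (counts : PySem.Dict (List String) Int) (own : Option (List String)) :
    ∀ (rest acc : List String),
      coveredB counts own acc rest = true ↔
        ∃ n, n ≤ rest.length ∧
          0 < (if some (acc ++ rest.take n) = own then counts.getD (acc ++ rest.take n) 0 - 1
               else counts.getD (acc ++ rest.take n) 0) := by
  intro rest
  induction rest with
  | nil =>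
    intro acc
    rw [coveredB]
    simp only [beq_iff_eq]
    by_cases hpos : 0 < (if some acc = own then counts.getD acc 0 - 1 else counts.getD acc 0)
    · rw [if_pos hpos]
      refine ⟨fun _ => ⟨0, Nat.zero_le _, by simpa using hpos⟩, fun _ => rfl⟩
    · rw [if_neg hpos]
      constructor
      · intro h; simp at h
      · rintro ⟨n, hn, hp⟩
        have hn0 : n = 0 := by simpa using hn
        subst hn0
        exact absurd (by simpa using hp) hpos
  | cons x xs ih =>
    intro acc
    rw [coveredB]
    simp only [beq_iff_eq]
    by_cases hpos : 0 < (if some acc = own then counts.getD acc 0 - 1 else counts.getD acc 0)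
    · rw [if_pos hpos]
      refine ⟨fun _ => ⟨0, Nat.zero_le _, by simpa using hpos⟩, fun _ => rfl⟩
    · rw [if_neg hpos]
      rw [ih (acc ++ [x])]
      constructor
      · rintro ⟨n, hn, hp⟩
        refine ⟨n + 1, by simpa using hn, ?_⟩
        rw [List.take_succ_cons, List.append_cons]
        exact hp
      · rintro ⟨n, hn, hp⟩
        cases n with
        | zero =>
          exfalso; apply hpos; simpa using hp
        | succ m =>
          refine ⟨m, by simpa using hn, ?_⟩
          rw [List.take_succ_cons, List.append_cons] at hp
          exact hp

theorem coveredB_nil_iff (counts : PySem.Dict (List String) Int) (own : Option (List String))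
    (t : List String) :
    coveredB counts own [] t = true ↔
      ∃ p, p <+: t ∧
        0 < (if some p = own then counts.getD p 0 - 1 else counts.getD p 0) := by
  rw [coveredB_iff]
  constructor
  · rintro ⟨n, hn, hp⟩
    exact ⟨t.take n, List.take_prefix n t, by simpa using hp⟩
  · rintro ⟨p, hpre, hp⟩
    refine ⟨p.length, List.IsPrefix.length_le hpre, ?_⟩
    rw [List.nil_append, ← List.prefix_iff_eq_take.mp hpre]
    exact hp

-- Skipping a non-contributing head of A's inner loop.
theorem skip_head_iff (i : Int) (tokens : List String)
    (e : Int × String × List String × Option (List String))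
    (rest : List (Int × String × List String × Option (List String)))
    (hhead : ¬ (i ≠ e.1 ∧ ∃ p, e.2.2.2 = some p ∧ p <+: tokens)) :
    (∃ e' ∈ e :: rest, i ≠ e'.1 ∧ ∃ p, e'.2.2.2 = some p ∧ p <+: tokens) ↔
    (∃ e' ∈ rest, i ≠ e'.1 ∧ ∃ p, e'.2.2.2 = some p ∧ p <+: tokens) := by
  simp only [List.mem_cons]
  constructor
  · rintro ⟨e', he', h⟩
    rcases he' with rfl | he'
    · exact absurd h hhead
    · exact ⟨e', he', h⟩
  · rintro ⟨e', he', h⟩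
    exact ⟨e', Or.inr he', h⟩

-- Characterisation of A's inner loop.
theorem innerA_iff (i : Int) (tokens : List String)
    (l : List (Int × String × List String × Option (List String))) :
    innerA i tokens l = true ↔
      ∃ e ∈ l, i ≠ e.1 ∧ ∃ p, e.2.2.2 = some p ∧ p <+: tokens := by
  induction l with
  | nil => simp [innerA]
  | cons e rest ih =>
    obtain ⟨j, s, t, otp⟩ := e
    cases otp with
    | none =>
      show (if i == j then innerA i tokens rest else innerA i tokens rest) = true ↔ _
      rw [ite_self, ih]
      exact (skip_head_iff i tokens (j, s, t, none) rest (by simp)).symm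
    | some p =>
      show (if i == j then innerA i tokens rest
            else if tokens.length < p.length then innerA i tokens rest
            else if PySem.List.slice tokens none (some (p.length : Int)) == p then true
            else innerA i tokens rest) = true ↔ _
      rw [PySem.List.slice_to_natCast]
      by_cases hij : i = j
      · rw [if_pos (by simpa using hij), ih]
        exact (skip_head_iff i tokens (j, s, t, some p) rest (by simp [hij])).symm
      · rw [if_neg (by simpa using hij)]
        by_cases hlen : tokens.length < p.length
        · rw [if_pos hlen, ih]
          refine (skip_head_iff i tokens (j, s, t, some p) rest ?_).symm
          rintro ⟨-, q, hq, hpre⟩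
          simp only [Option.some.injEq] at hq
          subst hq
          exact absurd (List.IsPrefix.length_le hpre) (by omega)
        · rw [if_neg hlen]
          by_cases heq : List.take p.length tokens = p
          · rw [if_pos (by simpa using heq)]
            refine ⟨fun _ => ⟨(j, s, t, some p), List.mem_cons_self, hij, p, rfl, ?_⟩, fun _ => rfl⟩
            exact List.prefix_iff_eq_take.mpr heq.symm
          · rw [if_neg (by simpa using heq), ih]
            refine (skip_head_iff i tokens (j, s, t, some p) rest ?_).symm
            rintro ⟨-, q, hq, hpre⟩
            simp only [Option.some.injEq] at hq
            subst hq
            exact absurd (List.prefix_iff_eq_take.mp hpre).symm heq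

-- Two distinct positions satisfying a predicate give count ≥ 2 …
theorem two_le_countP {α : Type} (q : α → Bool) (l : List α) :
    ∀ (i j : Nat), (hij : i < j) → (hj : j < l.length) →
      q (l[i]'(by omega)) = true → q l[j] = true → 2 ≤ l.countP q := by
  induction l with
  | nil =>
    intro i j hij hj
    simp at hj
  | cons x xs ih =>
    intro i j hij hj hqi hqj
    cases i with
    | zero =>
      simp only [List.getElem_cons_zero] at hqi
      obtain ⟨m, rfl⟩ : ∃ m, j = m + 1 := ⟨j - 1, by omega⟩
      simp only [List.getElem_cons_succ] at hqj
      rw [List.countP_cons_of_pos hqi]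
      have hm : m < xs.length := by simpa using hj
      have : 0 < xs.countP q := List.countP_pos_iff.mpr ⟨xs[m]'hm, List.getElem_mem _, hqj⟩
      omega
    | succ i' =>
      obtain ⟨m, rfl⟩ : ∃ m, j = m + 1 := ⟨j - 1, by omega⟩
      simp only [List.getElem_cons_succ] at hqi hqj
      have := ih i' m (by omega) (by simpa using hj) hqi hqj
      rw [List.countP_cons]
      omega

-- … and conversely.
theorem exists_two_of_countP {α : Type} (q : α → Bool) (l : List α) :
    2 ≤ l.countP q → ∃ i j, ∃ (hij : i < j) (hj : j < l.length),
      q (l[i]'(by omega)) = true ∧ q l[j] = true := by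
  induction l with
  | nil => intro h; simp at h
  | cons x xs ih =>
    intro h
    by_cases hx : q x = true
    · rw [List.countP_cons_of_pos hx] at h
      have h1 : 0 < xs.countP q := by omega
      obtain ⟨a, ha, hqa⟩ := List.countP_pos_iff.mp h1
      obtain ⟨m, hm, rfl⟩ := List.mem_iff_getElem.mp ha
      exact ⟨0, m + 1, by omega, by simpa using hm, by simpa using hx, by simpa using hqa⟩
    · rw [List.countP_cons_of_neg (by simpa using hx)] at h
      obtain ⟨i, j, hij, hj, hqi, hqj⟩ := ih h
      exact ⟨i + 1, j + 1, by omega, by simpa using hj, by simpa using hqi, by simpa using hqj⟩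

-- The counting argument: another index j covers position i iff some prefix of ts[i]
-- has counter value exceeding i's own contribution.
theorem cover_count (ts : List (List String)) (i : Nat) (hi : i < ts.length) :
    (∃ j, ∃ (hj : j < ts.length), j ≠ i ∧ ∃ p, tailKeyB ts[j] = some p ∧ p <+: ts[i])
    ↔ ∃ p, p <+: ts[i] ∧
        0 < (if some p = tailKeyB ts[i]
             then ((ts.countP fun u => tailKeyB u == some p : Nat) : Int) - 1
             else ((ts.countP fun u => tailKeyB u == some p : Nat) : Int)) := by
  constructor
  · rintro ⟨j, hj, hne, p, hp, hpre⟩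
    refine ⟨p, hpre, ?_⟩
    by_cases hown : some p = tailKeyB ts[i]
    · rw [if_pos hown]
      have hqi : (fun u => tailKeyB u == some p) ts[i] = true := by simp [hown.symm]
      have hqj : (fun u => tailKeyB u == some p) (ts[j]'hj) = true := by simp [hp]
      have h2 : 2 ≤ ts.countP (fun u => tailKeyB u == some p) := by
        rcases Nat.lt_or_ge j i with h | h
        · exact two_le_countP _ ts j i h hi hqj hqi
        · exact two_le_countP _ ts i j (by omega) hj hqi hqj
      omega
    · rw [if_neg hown]
      have : 0 < ts.countP (fun u => tailKeyB u == some p) :=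
        List.countP_pos_iff.mpr ⟨ts[j]'hj, List.getElem_mem _, by simp [hp]⟩
      omega
  · rintro ⟨p, hpre, hpos⟩
    by_cases hown : some p = tailKeyB ts[i]
    · rw [if_pos hown] at hpos
      have h2 : 2 ≤ ts.countP (fun u => tailKeyB u == some p) := by omega
      obtain ⟨a, b, hab, hb, hqa, hqb⟩ := exists_two_of_countP _ ts h2
      by_cases hai : a = i
      · refine ⟨b, hb, by omega, p, by simpa using hqb, hpre⟩
      · refine ⟨a, by omega, hai, p, by simpa using hqa, hpre⟩
    · rw [if_neg hown] at hpos
      have : 0 < ts.countP (fun u => tailKeyB u == some p) := by omega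
      obtain ⟨u, hu, hqu⟩ := List.countP_pos_iff.mp this
      obtain ⟨j, hj, rfl⟩ := List.mem_iff_getElem.mp hu
      refine ⟨j, hj, ?_, p, by simpa using hqu, hpre⟩
      intro hji
      subst hji
      exact hown (show tailKeyB _ = some p by simpa using hqu).symm

-- Filter/map over an enumerated list where nothing depends on the index.
theorem enum_filter_map {α β : Type} (q : α → Bool) (f : α → β) :
    ∀ (xs : List α) (s : Int),
      ((PySem.List.enumerate xs s).filter (fun e => q e.2)).map (fun e => f e.2)
      = (xs.filter q).map f := by
  intro xs
  induction xs with
  | nil => intro s; rfl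
  | cons x xs ih =>
    intro s
    rw [PySem.List.enumerate_cons]
    cases hq : q x with
    | true => simp [hq, ih]
    | false => simp [hq, ih]



-- The two tail-prefix helpers compute the same option.
-- Pointwise bridge: A's inner loop at index k decides exactly B's prefix test.
theorem point_eq (subjects : List String) (k : Nat) (hk : k < subjects.length) :
    innerA (k : Int) (splitDot subjects[k])
      (PySem.List.enumerate
        (subjects.map (fun s => (s, splitDot s, pyTailA (splitDot s)))) 0)
    = coveredB
        ((subjects.map splitDot).foldl (fun d tokens =>
          match tailKeyB tokens with
          | some key => d.insert key (d.getD key 0 + 1)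
          | none => d) PySem.Dict.empty)
        (tailKeyB (splitDot subjects[k])) [] (splitDot subjects[k]) := by
  have hk' : k < (subjects.map splitDot).length := by simpa using hk
  rw [Bool.eq_iff_iff, innerA_iff, coveredB_nil_iff]
  constructor
  · rintro ⟨e, he, hne, p, hp, hpre⟩
    obtain ⟨j, hj, rfl⟩ := (PySem.List.mem_enumerate_iff _ _ _).mp he
    simp only [List.getElem_map, zero_add] at hp hne hpre ⊢
    rw [pyTailA_eq_tailKeyB] at hp
    have hj' : j < (subjects.map splitDot).length := by simpa using hj
    have := (cover_count (subjects.map splitDot) k hk').mp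
      ⟨j, hj', by intro h; exact hne (by rw [h]), p, by simpa using hp, by simpa using hpre⟩
    obtain ⟨q, hqpre, hqpos⟩ := this
    refine ⟨q, by simpa using hqpre, ?_⟩
    rw [counts_getD]
    simpa using hqpos
  · rintro ⟨p, hpre, hpos⟩
    rw [counts_getD] at hpos
    have := (cover_count (subjects.map splitDot) k hk').mpr
      ⟨p, by simpa using hpre, by simpa using hpos⟩
    obtain ⟨j, hj', hne, q, hq, hqpre⟩ := this
    have hj : j < subjects.length := by simpa using hj'
    refine ⟨((j : Int), subjects[j], splitDot subjects[j], pyTailA (splitDot subjects[j])), ?_, ?_, q, ?_, ?_⟩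
    · apply (PySem.List.mem_enumerate_iff _ _ _).mpr
      exact ⟨j, by simpa using hj, by simp⟩
    · intro h
      apply hne
      have h' : (k : Int) = (j : Int) := h
      exact_mod_cast h'.symm
    · rw [pyTailA_eq_tailKeyB]
      simpa using hq
    · simpa using hqpre

-- An append-if fold with inverted branches is a filter of the negation.
theorem flip_fold {α : Type} (l : List α) (c : α → Bool) (f : α → String) :
    l.foldl (fun acc e => if c e then acc else acc ++ [f e]) []
    = (l.filter (fun e => !c e)).map f := by
  rw [PySem.List.foldl_congr_mem l _ (fun acc e => if (!c e) = true then acc ++ [f e] else acc) []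
      (by intro acc x _; cases hc : c x <;> simp [hc])]
  rw [PySem.List.foldl_append_if]
  simp

-- ===== VERDICT (by name: the statement is the Claim_ definition above) =====
theorem normalize_stream_subjects_spec : Claim_equal_normalize_stream_subjects := by
  intro subjects _
  show normalize_stream_subjects subjects = normalize_stream_subjects_alt subjects
  have hA : normalize_stream_subjects subjects
      = (PySem.List.enumerate
          (subjects.map (fun s => (s, splitDot s, pyTailA (splitDot s)))) 0).foldl
        (fun acc e => if innerA e.1 e.2.2.1
            (PySem.List.enumerate
              (subjects.map (fun s => (s, splitDot s, pyTailA (splitDot s)))) 0)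
          then acc else acc ++ [e.2.1]) [] := rfl
  have hB : normalize_stream_subjects_alt subjects
      = (subjects.zip (subjects.map splitDot)).foldl
        (fun res pr => if coveredB
            ((subjects.map splitDot).foldl (fun d tokens =>
              match tailKeyB tokens with
              | some key => d.insert key (d.getD key 0 + 1)
              | none => d) PySem.Dict.empty)
            (tailKeyB pr.2) [] pr.2
          then res else res ++ [pr.1]) [] := rfl
  rw [hA, hB, flip_fold, flip_fold]
  have hcong : ∀ e ∈ (PySem.List.enumerate
      (subjects.map (fun s => (s, splitDot s, pyTailA (splitDot s)))) 0),
      (!(innerA e.1 e.2.2.1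
        (PySem.List.enumerate
          (subjects.map (fun s => (s, splitDot s, pyTailA (splitDot s)))) 0)))
      = (!(coveredB
          ((subjects.map splitDot).foldl (fun d tokens =>
            match tailKeyB tokens with
            | some key => d.insert key (d.getD key 0 + 1)
            | none => d) PySem.Dict.empty)
          (tailKeyB e.2.2.1) [] e.2.2.1)) := by
    intro e he
    obtain ⟨k, hk, rfl⟩ := (PySem.List.mem_enumerate_iff _ _ _).mp he
    have hk' : k < subjects.length := by simpa using hk
    simp only [List.getElem_map, zero_add]
    rw [point_eq subjects k hk']
  rw [List.filter_congr hcong]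
  rw [enum_filter_map
    (q := fun x : String × List String × Option (List String) =>
      !(coveredB
        ((subjects.map splitDot).foldl (fun d tokens =>
          match tailKeyB tokens with
          | some key => d.insert key (d.getD key 0 + 1)
          | none => d) PySem.Dict.empty)
        (tailKeyB x.2.1) [] x.2.1))
    (f := fun x : String × List String × Option (List String) => x.1)]
  have hzip : subjects.zip (subjects.map splitDot)
      = subjects.map (fun s => (s, splitDot s)) := by
    conv_lhs => rw [show subjects.zip (subjects.map splitDot)
      = (subjects.map id).zip (subjects.map splitDot) by rw [List.map_id]]
    rw [List.zip_map']
    rfl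
  rw [hzip, List.filter_map, List.filter_map, List.map_map, List.map_map]
  rfl
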